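-- pv_equiv track=rewrite | github.com/beobmun/3_1_algorithm | algorithm/week_6/202155642_한법문.py | protein_len
-- ===== SOURCE A (Python) =====
-- def protein_len(amino_acid):
--     protein_len = -1
--     s = 0
--
--     while (s < len(amino_acid)):
--         if (amino_acid[s] == 'M'):
--             for e in range(s + 1, len(amino_acid)):
--                 if (amino_acid[e] == '_'):
--                     if (protein_len < e - s):
--                         protein_len = e - s
--                     s = e
--                     break
--         s += 1
--     return (protein_len)
-- ===== SOURCE B (Python) =====
-- def protein_len(amino_acid):
--     # single pass: remember the index of the 'M' currently awaiting its '_'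
--     best = -1
--     m = None
--     for i, c in enumerate(amino_acid):
--         if m is None:
--             if c == 'M':
--                 m = i
--         elif c == '_':
--             best = max(best, i - m)
--             m = None
--     return best
-- ===== Notes on version B (the rewrite author's own statement) =====
-- stated objective: faster
-- what changed: Replaced the while-loop with a nested forward scan for '_' by a single left-to-right pass that remembers the index of the 'M' currently awaiting its '_', removing the inner scan.
import Mathlib
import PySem

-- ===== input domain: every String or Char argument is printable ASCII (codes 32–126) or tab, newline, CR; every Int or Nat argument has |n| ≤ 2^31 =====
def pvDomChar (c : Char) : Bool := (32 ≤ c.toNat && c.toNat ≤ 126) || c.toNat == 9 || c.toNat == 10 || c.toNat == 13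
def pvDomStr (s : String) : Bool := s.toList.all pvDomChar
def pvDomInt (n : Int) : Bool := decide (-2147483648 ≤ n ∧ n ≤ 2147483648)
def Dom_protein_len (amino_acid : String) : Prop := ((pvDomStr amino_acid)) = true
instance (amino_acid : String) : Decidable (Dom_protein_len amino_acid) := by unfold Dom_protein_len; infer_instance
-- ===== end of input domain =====

-- B replaces A's outer-scan-plus-inner-scan with one pass holding the pending 'M' index (faster; return value only).

-- ===== PORT A =====
-- inner 'for e in range(s+1, len)' with break: first index ≥ e with char '_', none if the loop completes
def pvForA (cs : List Char) (e : Nat) : Option Nat :=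
  if h : e < cs.length then
    if cs[e] = '_' then some e else pvForA cs (e + 1)
  else none
termination_by cs.length - e

theorem pvForA_some_ge (cs : List Char) (e0 e : Nat) (h : pvForA cs e0 = some e) :
    e0 ≤ e ∧ e < cs.length := by
  fun_induction pvForA cs e0 with
  | case1 e0 hlt heq => simp at h; omega
  | case2 e0 hlt hne ih => have := ih h; omega
  | case3 e0 hge => simp at h

-- outer 'while s < len' loop carrying (protein_len, s)
def pvLoopA (cs : List Char) (s : Nat) (best : Int) : Int :=
  if h : s < cs.length then
    if cs[s] = 'M' then
      match hm : pvForA cs (s + 1) with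
      | some e => pvLoopA cs (e + 1) (if best < (e : Int) - (s : Int) then (e : Int) - (s : Int) else best)
      | none => pvLoopA cs (s + 1) best
    else pvLoopA cs (s + 1) best
  else best
termination_by cs.length - s
decreasing_by
  · have := pvForA_some_ge cs (s + 1) e hm; omega
  · omega
  · omega

def protein_len (amino_acid : String) : Int :=
  pvLoopA amino_acid.toList 0 (-1)

-- ===== PORT B =====
-- loop body of B: state = (best, pending-'M' index), pair = (char, index) from enumerate
def pvStepB (st : Int × Option Nat) (p : Char × Nat) : Int × Option Nat :=
  match st.2 with
  | none => if p.1 = 'M' then (st.1, some p.2) else st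
  | some m => if p.1 = '_' then (max st.1 ((p.2 : Int) - (m : Int)), none) else st

def protein_len_alt (amino_acid : String) : Int :=
  (amino_acid.toList.zipIdx.foldl pvStepB (-1, none)).1

-- ===== PRECONDITION & SPEC =====
def Spec_protein_len (amino_acid : String) (out : Int) : Prop := out = protein_len_alt amino_acid
instance (amino_acid : String) (out : Int) : Decidable (Spec_protein_len amino_acid out) := by unfold Spec_protein_len; infer_instance

-- ===== CLAIM (what is proved, stated in full; the proofs are below) =====
def Claim_equal_protein_len : Prop := ∀ (amino_acid : String), Dom_protein_len amino_acid → Spec_protein_len amino_acid (protein_len amino_acid)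

-- ===== LEMMAS AND PROOFS =====

-- zipIdx of a drop-suffix, one step
theorem zipIdx_drop_cons (cs : List Char) (s : Nat) (h : s < cs.length) :
    (cs.drop s).zipIdx s = (cs[s], s) :: (cs.drop (s + 1)).zipIdx (s + 1) := by
  rw [List.drop_eq_getElem_cons h]
  simp [List.zipIdx]

theorem pvForA_none_no_underscore (cs : List Char) (e0 : Nat) (h : pvForA cs e0 = none) :
    ∀ j, e0 ≤ j → ∀ (hj : j < cs.length), cs[j] ≠ '_' := by
  fun_induction pvForA cs e0 with
  | case1 e0 hlt heq => simp at h
  | case2 e0 hlt hne ih =>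
      intro j hj hjl
      rcases Nat.eq_or_lt_of_le hj with rfl | hj'
      · exact hne
      · exact ih h j hj' hjl
  | case3 e0 hge => intro j hj hjl; omega

theorem pvForA_some_underscore (cs : List Char) (e0 e : Nat) (h : pvForA cs e0 = some e) :
    cs[e]? = some '_' := by
  fun_induction pvForA cs e0 with
  | case1 e0 hlt heq =>
      injection h with h; subst h
      rw [List.getElem?_eq_getElem hlt, heq]
  | case2 e0 hlt hne ih => exact ih h
  | case3 e0 hge => simp at h

-- if no '_' occurs at or after s, A's loop returns best unchanged
theorem pvLoopA_no_underscore (cs : List Char) (s : Nat) (best : Int)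
    (hno : ∀ j, s ≤ j → ∀ (hj : j < cs.length), cs[j] ≠ '_') :
    pvLoopA cs s best = best := by
  fun_induction pvLoopA cs s best with
  | case1 s best hlt hM e hm ih =>
      exfalso
      have hge := pvForA_some_ge cs (s + 1) e hm
      have h2 := pvForA_some_underscore cs (s + 1) e hm
      rw [List.getElem?_eq_getElem hge.2] at h2
      exact hno e (by omega) hge.2 (by injection h2)
  | case2 s best hlt hM hm ih =>
      exact ih (fun j hj hjl => hno j (by omega) hjl)
  | case3 s best hlt hM ih =>
      exact ih (fun j hj hjl => hno j (by omega) hjl)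
  | case4 s best hge => rfl

-- B's fold over the suffix from s with a pending 'M' at index m, when A's inner loop
-- finds the first '_' at e: B records max best (e-m) there and continues with no pending 'M'
theorem pvFoldB_pending_some (cs : List Char) (s m e : Nat) (best : Int)
    (h : pvForA cs s = some e) :
    ((cs.drop s).zipIdx s |>.foldl pvStepB (best, some m)).1 =
      ((cs.drop (e + 1)).zipIdx (e + 1) |>.foldl pvStepB
        (max best ((e : Int) - (m : Int)), none)).1 := by
  fun_induction pvForA cs s with
  | case1 s hlt heq =>
      injection h with h; subst h
      rw [zipIdx_drop_cons cs s hlt]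
      simp [pvStepB, heq]
  | case2 s hlt hne ih =>
      rw [zipIdx_drop_cons cs s hlt]
      simp only [List.foldl_cons, pvStepB, if_neg hne]
      exact ih h
  | case3 s hge => simp at h

-- same fold when A's inner loop finds no '_': the pending 'M' is never matched
theorem pvFoldB_pending_none (cs : List Char) (s m : Nat) (best : Int)
    (h : pvForA cs s = none) :
    ((cs.drop s).zipIdx s |>.foldl pvStepB (best, some m)).1 = best := by
  fun_induction pvForA cs s with
  | case1 s hlt heq => simp at h
  | case2 s hlt hne ih =>
      rw [zipIdx_drop_cons cs s hlt]
      simp only [List.foldl_cons, pvStepB, if_neg hne]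
      exact ih h
  | case3 s hge =>
      rw [List.drop_eq_nil_of_le (by omega)]
      simp

-- main invariant: B's fold over the suffix from s with no pending 'M' equals A's loop from s
theorem pvFoldB_eq_pvLoopA (cs : List Char) (s : Nat) (best : Int) :
    ((cs.drop s).zipIdx s |>.foldl pvStepB (best, none)).1 = pvLoopA cs s best := by
  fun_induction pvLoopA cs s best with
  | case1 s best hlt hM e hm ih =>
      rw [zipIdx_drop_cons cs s hlt]
      simp only [List.foldl_cons, pvStepB, if_pos hM]
      rw [pvFoldB_pending_some cs (s + 1) s e best hm]
      have hmax : max best ((e : Int) - (s : Int)) =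
          (if best < (e : Int) - (s : Int) then (e : Int) - (s : Int) else best) := by
        by_cases hc : best < (e : Int) - (s : Int)
        · rw [if_pos hc]; exact max_eq_right hc.le
        · rw [if_neg hc]; exact max_eq_left (by omega)
      rw [hmax]; exact ih
  | case2 s best hlt hM hm ih =>
      rw [zipIdx_drop_cons cs s hlt]
      simp only [List.foldl_cons, pvStepB, if_pos hM]
      rw [pvFoldB_pending_none cs (s + 1) s best hm]
      rw [pvLoopA_no_underscore cs (s + 1) best
        (pvForA_none_no_underscore cs (s + 1) hm)]
  | case3 s best hlt hM ih =>
      rw [zipIdx_drop_cons cs s hlt]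
      simp only [List.foldl_cons, pvStepB, if_neg hM]
      exact ih
  | case4 s best hge =>
      rw [List.drop_eq_nil_of_le (by omega)]
      simp

-- ===== VERDICT (by name: the statement is the Claim_ definition above) =====
theorem protein_len_spec : Claim_equal_protein_len := by
  intro amino_acid _
  unfold Spec_protein_len protein_len protein_len_alt
  have := pvFoldB_eq_pvLoopA amino_acid.toList 0 (-1)
  simpa using this.symm
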